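-- pv_equiv track=rewrite | github.com/dremerb/hamburg_beteiligungsverfahren_helper | summarizer/summarizer.py | check_similar_words
-- ===== SOURCE A (Python) =====
-- def check_similar_words(words):
--     """
--     This function check for similar words, to remove e. g. "finde" and "finden", as they have the same meaning.
--     Check for word length as a first heuristic, then check if one word contains the other => same.
--
--     :param words: words to check
--     :return: list of similar words in the input. Only the latter similar word is returned.
--     """
--     similar = []
--     for i in range(len(words)):
--         for j in range(i+1, len(words)):
--             if abs(len(words[i]) - len(words[j])) < 3:              # if word length is similar
--                 if words[i] in words[j] or words[j] in words[i]:    # if one word is contained in the other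
--                     similar = similar + [words[j]]                    # mark as similar
--
--     return similar
-- ===== SOURCE B (Python) =====
-- def check_similar_words(words):
--     index = {}
--     for k, w in enumerate(words):
--         index.setdefault(w, []).append(k)
--     pairs = set()
--     for k, w in enumerate(words):
--         n = len(w)
--         subs = [w[s:s + m] for m in range(max(0, n - 2), n + 1) for s in range(n - m + 1)]
--         for sub in subs:
--             for k2 in index.get(sub, []):
--                 if k2 != k:
--                     pairs.add((min(k, k2), max(k, k2)))
--     return [words[j] for _, j in sorted(pairs)]
-- ===== Notes on version B (the rewrite author's own statement) =====
-- stated objective: faster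
-- what changed: Replaces A's all-pairs nested containment scan by a hash index from word to its indices: each word looks up its own substrings of length >= len-2 in the index, collects the containment pairs into a set, and sorts them back into A's (i,j) emission order.
import Mathlib
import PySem

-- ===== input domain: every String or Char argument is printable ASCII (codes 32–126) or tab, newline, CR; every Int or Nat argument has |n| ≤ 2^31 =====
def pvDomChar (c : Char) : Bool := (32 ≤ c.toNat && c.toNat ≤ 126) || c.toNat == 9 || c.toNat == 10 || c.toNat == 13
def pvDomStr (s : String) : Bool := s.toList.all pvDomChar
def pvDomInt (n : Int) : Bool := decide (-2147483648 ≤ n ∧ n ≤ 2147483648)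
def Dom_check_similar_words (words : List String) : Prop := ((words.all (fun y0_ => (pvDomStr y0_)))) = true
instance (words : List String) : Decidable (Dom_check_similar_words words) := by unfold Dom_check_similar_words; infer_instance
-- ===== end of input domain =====

-- B replaces A's all-pairs containment scan by a word→indices hash index queried with each word's
-- length-bounded substrings; the collected pair set is sorted back into A's (i,j) emission order (objective: faster, measured).

-- ===== PORT A =====
def check_similar_words (words : List String) : List String :=
  (PySem.List.pyRange 0 (PySem.List.len words) 1).foldl (fun similar i =>
    (PySem.List.pyRange (i + 1) (PySem.List.len words) 1).foldl (fun similar j =>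
      if |PySem.Str.len (PySem.List.pyGetD words i "") - PySem.Str.len (PySem.List.pyGetD words j "")| < 3 then
        if PySem.Str.isIn (PySem.List.pyGetD words i "") (PySem.List.pyGetD words j "")
            || PySem.Str.isIn (PySem.List.pyGetD words j "") (PySem.List.pyGetD words i "") then
          similar ++ [PySem.List.pyGetD words j ""]
        else similar
      else similar) similar) []

-- ===== PORT B =====
def check_similar_words_alt (words : List String) : List String :=
  let index : PySem.Dict String (List Int) :=
    (PySem.List.enumerate words).foldl
      (fun d kw => d.insert kw.2 (d.getD kw.2 [] ++ [kw.1])) PySem.Dict.empty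
  let pairs : PySem.Set (Int × Int) :=
    (PySem.List.enumerate words).foldl (fun pr kw =>
      let n := PySem.Str.len kw.2
      let subs : List String :=
        (PySem.List.pyRange (max 0 (n - 2)) (n + 1) 1).flatMap (fun m =>
          (PySem.List.pyRange 0 (n - m + 1) 1).map (fun s =>
            PySem.Str.slice kw.2 (some s) (some (s + m))))
      subs.foldl (fun pr sub =>
        (index.getD sub []).foldl (fun pr k2 =>
          if k2 ≠ kw.1 then PySem.Set.add pr (min kw.1 k2, max kw.1 k2) else pr) pr) pr)
      PySem.Set.empty
  (PySem.List.sorted2 pairs (fun p => p.1) (fun p => p.2)).map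
    (fun p => PySem.List.pyGetD words p.2 "")

-- ===== PRECONDITION & SPEC =====
def Spec_check_similar_words (words : List String) (out : List String) : Prop := out = check_similar_words_alt words
instance (words : List String) (out : List String) : Decidable (Spec_check_similar_words words out) := by unfold Spec_check_similar_words; infer_instance

-- ===== CLAIM (what is proved, stated in full; the proofs are below) =====
def Claim_equal_check_similar_words : Prop := ∀ (words : List String), Dom_check_similar_words words → Spec_check_similar_words words (check_similar_words words)


-- ===== LEMMAS AND PROOFS =====

-- abbreviations for the proofs (A's pair test, A's emission order, B's index / substring list / pair set)
def pvCond (words : List String) (i j : Int) : Bool :=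
  decide (|PySem.Str.len (PySem.List.pyGetD words i "") - PySem.Str.len (PySem.List.pyGetD words j "")| < 3)
    && (PySem.Str.isIn (PySem.List.pyGetD words i "") (PySem.List.pyGetD words j "")
        || PySem.Str.isIn (PySem.List.pyGetD words j "") (PySem.List.pyGetD words i ""))

def pvLex (words : List String) : List (Int × Int) :=
  (PySem.List.pyRange 0 (PySem.List.len words) 1).flatMap (fun i =>
    ((PySem.List.pyRange (i + 1) (PySem.List.len words) 1).filter (fun j => pvCond words i j)).map
      (fun j => (i, j)))

def pvIndex (words : List String) : PySem.Dict String (List Int) :=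
  (PySem.List.enumerate words).foldl
    (fun d kw => d.insert kw.2 (d.getD kw.2 [] ++ [kw.1])) PySem.Dict.empty

def pvSubs (w : String) : List String :=
  (PySem.List.pyRange (max 0 (PySem.Str.len w - 2)) (PySem.Str.len w + 1) 1).flatMap (fun m =>
    (PySem.List.pyRange 0 (PySem.Str.len w - m + 1) 1).map (fun s =>
      PySem.Str.slice w (some s) (some (s + m))))

def pvPairs (words : List String) : PySem.Set (Int × Int) :=
  (PySem.List.enumerate words).foldl (fun pr kw =>
    (pvSubs kw.2).foldl (fun pr sub =>
      ((pvIndex words).getD sub []).foldl (fun pr k2 =>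
        if k2 ≠ kw.1 then PySem.Set.add pr (min kw.1 k2, max kw.1 k2) else pr) pr) pr)
    PySem.Set.empty

def pvLt (a b : Int × Int) : Bool :=
  decide (a.1 < b.1) || (!decide (b.1 < a.1) && decide (a.2 < b.2))

-- ---- generic fold helpers ----
lemma pv_mem_foldl {A B : Type} (step : List B → A → List B) (Q : A → B → Prop)
    (h : ∀ s e x, x ∈ step s e ↔ x ∈ s ∨ Q e x) :
    ∀ (l : List A) (s0 : List B) (x : B), x ∈ l.foldl step s0 ↔ x ∈ s0 ∨ ∃ e ∈ l, Q e x := by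
  intro l
  induction l with
  | nil => simp
  | cons e t ih =>
    intro s0 x
    simp only [List.foldl_cons, ih, h, List.mem_cons]
    constructor
    · rintro ((hx | hq) | ⟨e', he', hq⟩)
      · exact Or.inl hx
      · exact Or.inr ⟨e, Or.inl rfl, hq⟩
      · exact Or.inr ⟨e', Or.inr he', hq⟩
    · rintro (hx | ⟨e', (rfl | he'), hq⟩)
      · exact Or.inl (Or.inl hx)
      · exact Or.inl (Or.inr hq)
      · exact Or.inr ⟨e', he', hq⟩

lemma pv_nodup_foldl {A B : Type} (step : List B → A → List B)
    (h : ∀ s e, s.Nodup → (step s e).Nodup) :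
    ∀ (l : List A) (s0 : List B), s0.Nodup → (l.foldl step s0).Nodup := by
  intro l
  induction l with
  | nil => exact fun _ h => h
  | cons e t ih => intro s0 hs; exact ih _ (h _ _ hs)

-- ---- A's loop is the lex-ordered pair list ----
lemma pv_A_eq (words : List String) :
    check_similar_words words = (pvLex words).map (fun p => PySem.List.pyGetD words p.2 "") := by
  have inner : ∀ (i : Int) (acc : List String),
      (PySem.List.pyRange (i + 1) (PySem.List.len words) 1).foldl (fun similar j =>
        if |PySem.Str.len (PySem.List.pyGetD words i "") - PySem.Str.len (PySem.List.pyGetD words j "")| < 3 then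
          if PySem.Str.isIn (PySem.List.pyGetD words i "") (PySem.List.pyGetD words j "")
              || PySem.Str.isIn (PySem.List.pyGetD words j "") (PySem.List.pyGetD words i "") then
            similar ++ [PySem.List.pyGetD words j ""]
          else similar
        else similar) acc
      = acc ++ ((PySem.List.pyRange (i + 1) (PySem.List.len words) 1).filter
          (fun j => pvCond words i j)).map (fun j => PySem.List.pyGetD words j "") := by
    intro i acc
    rw [PySem.List.foldl_congr_mem _ _
      (fun acc j => if pvCond words i j then acc ++ [PySem.List.pyGetD words j ""] else acc) _
      (by
        intro acc' j _
        simp only [pvCond, Bool.and_eq_true, Bool.or_eq_true, decide_eq_true_eq]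
        split_ifs <;> first | rfl | tauto)]
    exact PySem.List.foldl_append_if _ _ _ _
  unfold check_similar_words pvLex
  rw [PySem.List.foldl_congr_mem _ _
    (fun acc i => acc ++ ((PySem.List.pyRange (i + 1) (PySem.List.len words) 1).filter
      (fun j => pvCond words i j)).map (fun j => PySem.List.pyGetD words j "")) _
    (fun acc i _ => inner i acc)]
  rw [PySem.List.foldl_append_eq_flatMap, List.nil_append, List.map_flatMap]
  congr 1
  funext i
  rw [List.map_map]
  rfl

-- ---- the index dictionary ----
lemma pv_index_getD (ps : List (Int × String)) (d : PySem.Dict String (List Int)) (v : String) :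
    (ps.foldl (fun d kw => d.insert kw.2 (d.getD kw.2 [] ++ [kw.1])) d).getD v []
      = d.getD v [] ++ (ps.filter (fun kw => kw.2 = v)).map (fun kw => kw.1) := by
  induction ps generalizing d with
  | nil => simp
  | cons kw t ih =>
    simp only [List.foldl_cons, ih, List.filter_cons]
    rw [PySem.Dict.getD_insert]
    by_cases hv : kw.2 = v
    · subst hv
      simp
    · have : ¬ (v = kw.2) := fun h => hv h.symm
      simp [this, hv]

lemma pv_mem_index (words : List String) (v : String) (k2 : Int) :
    k2 ∈ (pvIndex words).getD v [] ↔ ∃ (kk : Nat) (h : kk < words.length), words[kk] = v ∧ k2 = (kk : Int) := by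
  unfold pvIndex
  rw [pv_index_getD]
  simp only [List.mem_append, List.mem_map, List.mem_filter, decide_eq_true_eq]
  constructor
  · rintro (h0 | ⟨kw, ⟨hkw, hv⟩, rfl⟩)
    · exact absurd h0 (by simp [PySem.Dict.empty, PySem.Dict.getD, PySem.Dict.get?])
    · rcases (PySem.List.mem_enumerate_iff words 0 kw).mp hkw with ⟨kk, hlt, rfl⟩
      exact ⟨kk, hlt, by simpa using hv, by simp⟩
  · rintro ⟨kk, hlt, hv, rfl⟩
    refine Or.inr ⟨((kk : Int), words[kk]), ⟨?_, hv⟩, rfl⟩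
    exact (PySem.List.mem_enumerate_iff words 0 _).mpr ⟨kk, hlt, by simp⟩

-- ---- the substring list ----
lemma pv_mem_subs (w v : String) :
    v ∈ pvSubs w ↔ v.toList <:+: w.toList ∧ w.toList.length ≤ v.toList.length + 2 := by
  unfold pvSubs
  simp only [List.mem_flatMap, List.mem_map, PySem.List.mem_pyRange_one, PySem.Str.len_eq]
  constructor
  · rintro ⟨m, ⟨hm1, hm2⟩, s, ⟨hs1, hs2⟩, rfl⟩
    have hm0 : 0 ≤ m := le_trans (le_max_left _ _) hm1
    have hs0 : 0 ≤ s := hs1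
    obtain ⟨a, rfl⟩ : ∃ a : Nat, s = (a : Int) := ⟨s.toNat, (Int.toNat_of_nonneg hs0).symm⟩
    obtain ⟨b, rfl⟩ : ∃ b : Nat, m = (b : Int) := ⟨m.toNat, (Int.toNat_of_nonneg hm0).symm⟩
    simp only [max_le_iff] at hm1
    have hslice : (PySem.Str.slice w (some (a : Int)) (some ((a : Int) + (b : Int)))).toList
        = (w.toList.drop a).take b := by
      rw [PySem.Str.toList_slice, PySem.Chars.slice_eq_listSlice, PySem.List.slice_natCast_add]
    rw [hslice]
    have hlen2 : ((w.toList.drop a).take b).length = b := by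
      rw [List.length_take, List.length_drop]
      omega
    refine ⟨((w.toList.drop a).take_prefix b).isInfix.trans (w.toList.drop_suffix a).isInfix, ?_⟩
    rw [hlen2]
    omega
  · rintro ⟨⟨pre, suf, hw⟩, hlen⟩
    have hlw := congrArg List.length hw
    simp only [List.length_append] at hlw
    refine ⟨(v.toList.length : Int), ⟨?_, ?_⟩, (pre.length : Int), ⟨?_, ?_⟩, ?_⟩
    · simp only [max_le_iff]
      omega
    · omega
    · exact Int.natCast_nonneg _
    · omega
    · apply String.toList_inj.mp
      rw [PySem.Str.toList_slice, PySem.Chars.slice_eq_listSlice, PySem.List.slice_natCast_add,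
        ← hw, List.append_assoc, List.drop_left, List.take_left]

lemma pv_pairs_raw (words : List String) (x : Int × Int) :
    x ∈ pvPairs words ↔ ∃ kw ∈ PySem.List.enumerate words, ∃ sub ∈ pvSubs kw.2,
      ∃ k2 ∈ (pvIndex words).getD sub [], k2 ≠ kw.1 ∧ x = (min kw.1 k2, max kw.1 k2) := by
  have h1 : ∀ (kv : Int) (pr : List (Int × Int)) (lst : List Int) (x : Int × Int),
      x ∈ lst.foldl (fun pr k2 =>
          if k2 ≠ kv then PySem.Set.add pr (min kv k2, max kv k2) else pr) pr
        ↔ x ∈ pr ∨ ∃ k2 ∈ lst, k2 ≠ kv ∧ x = (min kv k2, max kv k2) := by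
    intro kv pr lst x
    refine pv_mem_foldl _ (fun k2 x => k2 ≠ kv ∧ x = (min kv k2, max kv k2)) ?_ lst pr x
    intro s e x
    split_ifs with he
    · simp only [PySem.Set.mem_add]
      tauto
    · exact ⟨Or.inl, fun h => h.elim id (fun h' => absurd h'.1 he)⟩
  have h2 : ∀ (kv : Int) (pr : List (Int × Int)) (subs : List String) (x : Int × Int),
      x ∈ subs.foldl (fun pr sub => ((pvIndex words).getD sub []).foldl (fun pr k2 =>
          if k2 ≠ kv then PySem.Set.add pr (min kv k2, max kv k2) else pr) pr) pr
        ↔ x ∈ pr ∨ ∃ sub ∈ subs, ∃ k2 ∈ (pvIndex words).getD sub [],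
            k2 ≠ kv ∧ x = (min kv k2, max kv k2) :=
    fun kv pr subs x => pv_mem_foldl _
      (fun sub x => ∃ k2 ∈ (pvIndex words).getD sub [], k2 ≠ kv ∧ x = (min kv k2, max kv k2))
      (fun s e x => h1 kv s _ x) subs pr x
  unfold pvPairs
  rw [pv_mem_foldl _
    (fun kw x => ∃ sub ∈ pvSubs kw.2, ∃ k2 ∈ (pvIndex words).getD sub [],
      k2 ≠ kw.1 ∧ x = (min kw.1 k2, max kw.1 k2))
    (fun s e x => h2 e.1 s (pvSubs e.2) x)]
  simp [PySem.Set.empty]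

lemma pv_nodup_pairs (words : List String) : (pvPairs words).Nodup := by
  have h1 : ∀ (kv : Int) (pr : List (Int × Int)) (lst : List Int),
      pr.Nodup → (lst.foldl (fun pr k2 =>
        if k2 ≠ kv then PySem.Set.add pr (min kv k2, max kv k2) else pr) pr).Nodup := by
    intro kv pr lst h
    refine pv_nodup_foldl _ ?_ lst pr h
    intro s e hs
    split_ifs with he
    · exact PySem.Set.nodup_add s _ hs
    · exact hs
  refine pv_nodup_foldl _ ?_ _ _ List.nodup_nil
  intro s kw hs
  refine pv_nodup_foldl _ ?_ _ _ hs
  intro s' sub hs'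
  exact h1 kw.1 s' _ hs' 

lemma pv_cond_iff (words : List String) (a b : Nat) (ha : a < words.length) (hb : b < words.length) :
    pvCond words a b = true ↔
      ((words[a]).toList <:+: (words[b]).toList ∧ (words[b]).toList.length ≤ (words[a]).toList.length + 2) ∨
      ((words[b]).toList <:+: (words[a]).toList ∧ (words[a]).toList.length ≤ (words[b]).toList.length + 2) := by
  unfold pvCond
  rw [PySem.List.pyGetD_natCast, PySem.List.pyGetD_natCast,
    List.getD_eq_getElem _ _ ha, List.getD_eq_getElem _ _ hb]
  simp only [Bool.and_eq_true, Bool.or_eq_true, decide_eq_true_eq, PySem.Str.isIn_iff_infix,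
    PySem.Str.len_eq, abs_lt]
  constructor
  · rintro ⟨hl, h | h⟩
    · exact Or.inl ⟨h, by have := h.length_le; omega⟩
    · exact Or.inr ⟨h, by have := h.length_le; omega⟩
  · rintro (⟨h, hle⟩ | ⟨h, hle⟩)
    · exact ⟨by have := h.length_le; omega, Or.inl h⟩
    · exact ⟨by have := h.length_le; omega, Or.inr h⟩

lemma pv_mem_pairs (words : List String) (x : Int × Int) :
    x ∈ pvPairs words ↔ ∃ a b : Nat, a < b ∧ b < words.length ∧ pvCond words a b = true ∧ x = ((a : Int), (b : Int)) := by
  rw [pv_pairs_raw]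
  constructor
  · rintro ⟨kw, hkw, sub, hsub, k2, hk2, hne, rfl⟩
    rcases (PySem.List.mem_enumerate_iff words 0 kw).mp hkw with ⟨k, hk, rfl⟩
    rcases (pv_mem_index words sub k2).mp hk2 with ⟨kk, hkk, hvsub, rfl⟩
    rcases (pv_mem_subs (words[k]) sub).mp hsub with ⟨hinf, hlen⟩
    have hne' : kk ≠ k := by
      intro h
      exact hne (by simp [h])
    subst hvsub
    rcases Nat.lt_or_gt_of_ne hne' with hlt | hlt
    · refine ⟨kk, k, hlt, hk, ?_, ?_⟩
      · exact (pv_cond_iff words kk k (lt_trans hlt hk) hk).mpr (Or.inl ⟨hinf, hlen⟩)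
      · have h1 : min ((0 : Int) + (k : Int)) (kk : Int) = (kk : Int) := by omega
        have h2 : max ((0 : Int) + (k : Int)) (kk : Int) = (k : Int) := by omega
        rw [h1, h2]
    · refine ⟨k, kk, hlt, hkk, ?_, ?_⟩
      · exact (pv_cond_iff words k kk hk hkk).mpr (Or.inr ⟨hinf, hlen⟩)
      · have h1 : min ((0 : Int) + (k : Int)) (kk : Int) = (k : Int) := by omega
        have h2 : max ((0 : Int) + (k : Int)) (kk : Int) = (kk : Int) := by omega
        rw [h1, h2]
  · rintro ⟨a, b, hab, hb, hcond, rfl⟩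
    have ha : a < words.length := lt_trans hab hb
    rcases (pv_cond_iff words a b ha hb).mp hcond with ⟨hinf, hlen⟩ | ⟨hinf, hlen⟩
    · refine ⟨((b : Int), words[b]), (PySem.List.mem_enumerate_iff words 0 _).mpr ⟨b, hb, by simp⟩,
        words[a], (pv_mem_subs _ _).mpr ⟨hinf, hlen⟩,
        (a : Int), (pv_mem_index words _ _).mpr ⟨a, ha, rfl, rfl⟩, ?_, ?_⟩
      · simp only [ne_eq, Int.natCast_inj]
        omega
      · have h1 : min ((b : Int)) ((a : Int)) = (a : Int) := by omega
        have h2 : max ((b : Int)) ((a : Int)) = (b : Int) := by omega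
        rw [h1, h2]
    · refine ⟨((a : Int), words[a]), (PySem.List.mem_enumerate_iff words 0 _).mpr ⟨a, ha, by simp⟩,
        words[b], (pv_mem_subs _ _).mpr ⟨hinf, hlen⟩,
        (b : Int), (pv_mem_index words _ _).mpr ⟨b, hb, rfl, rfl⟩, ?_, ?_⟩
      · simp only [ne_eq, Int.natCast_inj]
        omega
      · have h1 : min ((a : Int)) ((b : Int)) = (a : Int) := by omega
        have h2 : max ((a : Int)) ((b : Int)) = (b : Int) := by omega
        rw [h1, h2]

-- ---- uniqueness of the sorted order ----
lemma pv_lt_iff (a b : Int × Int) : pvLt a b = true ↔ a.1 < b.1 ∨ (a.1 = b.1 ∧ a.2 < b.2) := by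
  simp only [pvLt, Bool.or_eq_true, Bool.and_eq_true, Bool.not_eq_true', decide_eq_true_eq,
    decide_eq_false_iff_not]
  omega

lemma pv_lt_total (x y : Int × Int) (h : x ≠ y) : pvLt x y = true ∨ pvLt y x = true := by
  rw [pv_lt_iff, pv_lt_iff]
  rcases x with ⟨x1, x2⟩; rcases y with ⟨y1, y2⟩
  have h' : ¬ (x1 = y1 ∧ x2 = y2) := fun hh => h (by simp [hh.1, hh.2])
  simp only
  omega

lemma pv_lt_trans {a b c : Int × Int} (h1 : pvLt a b = true) (h2 : pvLt b c = true) :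
    pvLt a c = true := by
  rw [pv_lt_iff] at h1 h2 ⊢; omega

lemma pv_lt_asymm {a b : Int × Int} (h1 : pvLt a b = true) (h2 : pvLt b a = true) : False := by
  rw [pv_lt_iff] at h1 h2; omega

lemma pv_insertBy_pairwise (x : Int × Int) (ys : List (Int × Int))
    (h : ys.Pairwise (fun a b => pvLt a b = true)) (hx : ∀ y ∈ ys, x ≠ y) :
    (PySem.List.insertBy pvLt x ys).Pairwise (fun a b => pvLt a b = true) := by
  induction ys with
  | nil => simp [PySem.List.insertBy]
  | cons y t ih =>
    rw [List.pairwise_cons] at h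
    simp only [PySem.List.insertBy]
    split
    · rename_i hxy
      refine List.pairwise_cons.mpr ⟨?_, List.pairwise_cons.mpr ⟨h.1, h.2⟩⟩
      intro z hz
      rcases List.mem_cons.mp hz with rfl | hz
      · exact hxy
      · exact pv_lt_trans hxy (h.1 z hz)
    · rename_i hxy
      have hyx : pvLt y x = true := by
        rcases pv_lt_total x y (hx y (List.mem_cons_self)) with h' | h'
        · exact absurd h' hxy
        · exact h'
      refine List.pairwise_cons.mpr ⟨?_, ih h.2 (fun z hz => hx z (List.mem_cons_of_mem _ hz))⟩
      intro z hz
      rcases (PySem.List.mem_insertBy pvLt x z t).mp hz with rfl | hz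
      · exact hyx
      · exact h.1 z hz

lemma pv_sorted2_pairwise (xs : List (Int × Int)) (hx : xs.Nodup) :
    (PySem.List.sorted2 xs (fun p => p.1) (fun p => p.2)).Pairwise (fun a b => pvLt a b = true) := by
  have key : ∀ (l : List (Int × Int)) (acc : List (Int × Int)),
      acc.Pairwise (fun a b => pvLt a b = true) → (∀ x ∈ l, ∀ y ∈ acc, x ≠ y) → l.Nodup →
      (l.foldl (fun acc x => PySem.List.insertBy pvLt x acc) acc).Pairwise
        (fun a b => pvLt a b = true) := by
    intro l
    induction l with
    | nil => intro acc h _ _; exact h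
    | cons x t ih =>
      intro acc hacc hdisj hnd
      rw [List.nodup_cons] at hnd
      refine ih _ (pv_insertBy_pairwise x acc hacc (fun y hy => hdisj x List.mem_cons_self y hy)) ?_ hnd.2
      intro e he y hy
      rcases (PySem.List.mem_insertBy pvLt x y acc).mp hy with rfl | hy
      · exact fun h' => hnd.1 (h' ▸ he)
      · exact hdisj e (List.mem_cons_of_mem _ he) y hy
  exact key xs [] (List.Pairwise.nil) (by simp) hx

lemma pv_strict_sorted_perm_eq :
    ∀ (l1 l2 : List (Int × Int)), l1.Perm l2 → l1.Pairwise (fun a b => pvLt a b = true) ->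
      l2.Pairwise (fun a b => pvLt a b = true) → l1 = l2 := by
  intro l1
  induction l1 with
  | nil => intro l2 hp _ _; exact (hp.nil_eq).symm ▸ rfl
  | cons a t1 ih =>
    intro l2 hp h1 h2
    cases l2 with
    | nil => exact absurd hp.symm (by simp)
    | cons b t2 =>
      rw [List.pairwise_cons] at h1 h2
      have hab : a = b := by
        by_contra hne
        have ha2 : a ∈ b :: t2 := hp.mem_iff.mp List.mem_cons_self
        have hb1 : b ∈ a :: t1 := hp.mem_iff.mpr List.mem_cons_self
        rcases List.mem_cons.mp ha2 with rfl | ha2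
        · exact hne rfl
        rcases List.mem_cons.mp hb1 with rfl | hb1
        · exact hne rfl
        exact pv_lt_asymm (h1.1 b hb1) (h2.1 a ha2)
      subst hab
      exact congrArg (a :: ·) (ih t2 hp.cons_inv h1.2 h2.2)

-- ---- the lex list ----
lemma pv_mem_lex (words : List String) (x : Int × Int) :
    x ∈ pvLex words ↔ ∃ a b : Nat, a < b ∧ b < words.length ∧ pvCond words a b = true ∧ x = ((a : Int), (b : Int)) := by
  unfold pvLex
  simp only [List.mem_flatMap, List.mem_map, List.mem_filter, PySem.List.mem_pyRange_one,
    PySem.List.len_eq]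
  constructor
  · rintro ⟨i, ⟨hi0, hin⟩, j, ⟨⟨hij, hjn⟩, hc⟩, rfl⟩
    refine ⟨i.toNat, j.toNat, by omega, by omega, ?_, ?_⟩
    · rwa [Int.toNat_of_nonneg hi0, Int.toNat_of_nonneg (by omega)]
    · rw [Int.toNat_of_nonneg hi0, Int.toNat_of_nonneg (by omega)]
  · rintro ⟨a, b, hab, hb, hc, rfl⟩
    exact ⟨(a : Int), ⟨by omega, by omega⟩, (b : Int), ⟨⟨by omega, by omega⟩, hc⟩, rfl⟩

lemma pv_lex_pairwise (words : List String) : (pvLex words).Pairwise (fun a b => pvLt a b = true) := by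
  unfold pvLex
  rw [List.pairwise_flatMap]
  constructor
  · intro i _
    rw [List.pairwise_map]
    refine List.Pairwise.imp ?_ ((PySem.List.pairwise_lt_pyRange_one _ _).filter _)
    intro a b hab
    exact (pv_lt_iff _ _).mpr (Or.inr ⟨rfl, hab⟩)
  · refine List.Pairwise.imp ?_ (PySem.List.pairwise_lt_pyRange_one _ _)
    intro i1 i2 h12 x hx y hy
    rcases List.mem_map.mp hx with ⟨j1, _, rfl⟩
    rcases List.mem_map.mp hy with ⟨j2, _, rfl⟩
    exact (pv_lt_iff _ _).mpr (Or.inl h12)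

lemma pv_lex_nodup (words : List String) : (pvLex words).Nodup := by
  refine (pv_lex_pairwise words).imp ?_
  intro a b hab h
  subst h
  rcases (pv_lt_iff a a).mp hab with h | h
  · exact lt_irrefl _ h
  · exact lt_irrefl _ h.2

-- ---- assembly ----
theorem check_similar_words_main (words : List String) :
    check_similar_words words = check_similar_words_alt words := by
  have hB : check_similar_words_alt words
      = (PySem.List.sorted2 (pvPairs words) (fun p => p.1) (fun p => p.2)).map
          (fun p => PySem.List.pyGetD words p.2 "") := rfl
  have hperm : (PySem.List.sorted2 (pvPairs words) (fun p => p.1) (fun p => p.2)).Perm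
      (pvLex words) := by
    refine (PySem.List.sorted2_perm _ _ _ _).trans ?_
    refine (List.perm_ext_iff_of_nodup (pv_nodup_pairs words) (pv_lex_nodup words)).mpr ?_
    intro a
    rw [pv_mem_pairs, pv_mem_lex]
  have hsort : PySem.List.sorted2 (pvPairs words) (fun p => p.1) (fun p => p.2) = pvLex words :=
    pv_strict_sorted_perm_eq _ _ hperm
      (pv_sorted2_pairwise _ (pv_nodup_pairs words)) (pv_lex_pairwise words)
  rw [pv_A_eq, hB, hsort]

-- ===== VERDICT (by name: the statement is the Claim_ definition above) =====
theorem check_similar_words_spec : Claim_equal_check_similar_words := by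
  intro words _
  unfold Spec_check_similar_words
  exact check_similar_words_main words
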